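-- pv_equiv track=rewrite | github.com/KuhtinGeorgi/- | CW.18.10.2023.py | nb_dig
-- ===== SOURCE A (Python) =====
-- def nb_dig(n, d):
--     result = 1 if d == 0 else 0
--     for k in range(1, n + 1):
--         x = k * k
--         while x:
--             if x % 10 == d:
--                 result += 1
--             x //= 10
--     return result
-- ===== SOURCE B (Python) =====
-- def nb_dig(n, d):
--     # Position-major traversal: instead of extracting all digits of each square,
--     # loop over decimal positions p = 1, 10, 100, ... and count, across all
--     # squares at once, those whose digit at position p equals d.
--     result = 1 if d == 0 else 0
--     if n >= 1:
--         nn = n * n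
--         p = 1
--         while p <= nn:
--             for k in range(1, n + 1):
--                 kk = k * k
--                 if kk >= p and (kk // p) % 10 == d:
--                     result += 1
--             p *= 10
--     return result
-- ===== Notes on version B (the rewrite author's own statement) =====
-- stated objective: alternative
-- what changed: The iteration is transposed: A walks each square and strips its digits with an inner %10///10 loop, while B loops over decimal positions p=1,10,100,... up to n*n and, for each position, counts in one pass over all squares those whose digit at that position equals d.
import Mathlib
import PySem

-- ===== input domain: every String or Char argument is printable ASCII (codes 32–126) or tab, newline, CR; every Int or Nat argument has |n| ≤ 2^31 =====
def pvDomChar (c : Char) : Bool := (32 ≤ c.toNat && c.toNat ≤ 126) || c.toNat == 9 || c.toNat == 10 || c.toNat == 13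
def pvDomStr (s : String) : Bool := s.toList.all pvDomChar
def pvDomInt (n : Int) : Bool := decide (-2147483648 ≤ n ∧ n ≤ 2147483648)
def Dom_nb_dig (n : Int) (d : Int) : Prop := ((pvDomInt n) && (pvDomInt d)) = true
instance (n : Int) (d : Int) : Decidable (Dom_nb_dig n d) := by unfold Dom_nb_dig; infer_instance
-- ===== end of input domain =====

-- B transposes A's iteration: instead of stripping each square's digits with an inner
-- %10 / //10 loop, it loops over decimal positions p = 1, 10, 100, … up to n*n and, per
-- position, counts in one pass which squares carry digit d there (objective: alternative).

-- ===== PORT A =====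
-- inner 'while x:' loop of A; A only runs it on x = k*k ≥ 0, so the Nat-valued
-- x with Nat % and / is exact for Python's x % 10 and x //= 10 on these calls
def nbDigWhile (x : Nat) (d : Int) (result : Int) : Int :=
  if x = 0 then result
  else nbDigWhile (x / 10) d (if ((x % 10 : Nat) : Int) = d then result + 1 else result)
  termination_by x
  decreasing_by exact Nat.div_lt_self (Nat.pos_of_ne_zero (by assumption)) (by norm_num)

def nb_dig (n : Int) (d : Int) : Int :=
  (PySem.List.pyRange 1 (n + 1) 1).foldl
    (fun result k => nbDigWhile (k * k).toNat d result)
    (if d = 0 then 1 else 0)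

-- ===== PORT B =====
-- 'for k in range(1, n+1): if kk >= p and (kk // p) % 10 == d: result += 1'
def altInner (n : Int) (d : Int) (p : Nat) (result : Int) : Int :=
  (PySem.List.pyRange 1 (n + 1) 1).foldl
    (fun r k =>
      if (p : Int) ≤ k * k ∧ PySem.Int.mod (PySem.Int.floordiv (k * k) (p : Int)) 10 = d
      then r + 1 else r) result

-- 'while p <= nn: …; p *= 10'; p starts at 1 and only gets multiplied by 10, hence 0 < p
def altLoop (nn : Nat) (n : Int) (d : Int) (p : Nat) (hp : 0 < p) (result : Int) : Int :=
  if h : p ≤ nn then altLoop nn n d (p * 10) (by omega) (altInner n d p result)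
  else result
  termination_by nn + 1 - p
  decreasing_by omega

def nb_dig_alt (n : Int) (d : Int) : Int :=
  let result : Int := if d = 0 then 1 else 0
  if 1 ≤ n then altLoop (n * n).toNat n d 1 (by norm_num) result else result

-- ===== PRECONDITION & SPEC =====
def Spec_nb_dig (n : Int) (d : Int) (out : Int) : Prop := out = nb_dig_alt n d
instance (n : Int) (d : Int) (out : Int) : Decidable (Spec_nb_dig n d out) := by unfold Spec_nb_dig; infer_instance

-- ===== CLAIM (what is proved, stated in full; the proofs are below) =====
def Claim_equal_nb_dig : Prop := ∀ (n : Int) (d : Int), Dom_nb_dig n d → Spec_nb_dig n d (nb_dig n d)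

-- ===== LEMMAS AND PROOFS =====

-- count of digit d among the decimal digits of x (A's per-square contribution)
def cA (d : Int) (x : Nat) : Int := ((Nat.digits 10 x).countP (fun (a : Nat) => decide ((a : Int) = d)) : Nat)

-- A's inner while-loop counts the digits of x equal to d
theorem pv_while_eq (x : Nat) (d : Int) : ∀ (r : Int), nbDigWhile x d r = r + cA d x := by
  induction x using Nat.strong_induction_on with
  | _ x ih =>
    intro r
    by_cases hx : x = 0
    · subst hx; simp [nbDigWhile, cA]
    · rw [nbDigWhile, if_neg hx,
        ih (x / 10) (Nat.div_lt_self (Nat.pos_of_ne_zero hx) (by norm_num))]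
      simp only [cA]
      rw [Nat.digits_def' (by norm_num : (1:Nat) < 10) (Nat.pos_of_ne_zero hx), List.countP_cons]
      by_cases h : ((x % 10 : Nat) : Int) = d
      · simp only [if_pos h, decide_eq_true h, if_true]
        push_cast; ring
      · simp only [if_neg h, decide_eq_false h, Bool.false_eq_true, if_false]
        push_cast; ring

-- B's guard at position p, rewritten over Nat arithmetic on (k*k).toNat / p
theorem pv_cond_iff (d : Int) (p : Nat) (hp : 0 < p) (k : Int) :
    ((p : Int) ≤ k * k ∧ PySem.Int.mod (PySem.Int.floordiv (k * k) (p : Int)) 10 = d)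
      ↔ (1 ≤ (k * k).toNat / p ∧ (((k * k).toNat / p % 10 : Nat) : Int) = d) := by
  have hx : (((k * k).toNat : Nat) : Int) = k * k := Int.toNat_of_nonneg (mul_self_nonneg k)
  rw [← hx, PySem.Int.floordiv_natCast]
  rw [show (10 : Int) = ((10 : Nat) : Int) from rfl, PySem.Int.mod_natCast]
  constructor
  · rintro ⟨h1, h2⟩
    exact ⟨(Nat.one_le_div_iff hp).mpr (by exact_mod_cast h1), h2⟩
  · rintro ⟨h1, h2⟩
    exact ⟨by exact_mod_cast (Nat.one_le_div_iff hp).mp h1, h2⟩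

-- one pass of B at position p equals adding the 0/1 indicator per square
theorem pv_inner_eq (n : Int) (d : Int) (p : Nat) (hp : 0 < p) (r : Int) :
    altInner n d p r = r + ((PySem.List.pyRange 1 (n + 1) 1).map
      (fun k => if 1 ≤ (k * k).toNat / p ∧ (((k * k).toNat / p % 10 : Nat) : Int) = d
                then (1 : Int) else 0)).sum := by
  unfold altInner
  rw [PySem.List.foldl_congr_mem _ _
      (fun r k => r + if 1 ≤ (k * k).toNat / p ∧ (((k * k).toNat / p % 10 : Nat) : Int) = d
                      then (1 : Int) else 0) _
      (by intro acc k _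
          by_cases h : (p : Int) ≤ k * k ∧ PySem.Int.mod (PySem.Int.floordiv (k * k) (p : Int)) 10 = d
          · simp only [if_pos h, if_pos ((pv_cond_iff d p hp k).mp h)]
          · simp only [if_neg h, if_neg (fun hc => h ((pv_cond_iff d p hp k).mpr hc)), add_zero]),
    PySem.List.foldl_add]

-- peeling the lowest digit of y: indicator at the units place plus count of d in y/10
theorem pv_step_eq (d : Int) (y : Nat) :
    (if 1 ≤ y ∧ ((y % 10 : Nat) : Int) = d then (1 : Int) else 0) + cA d (y / 10) = cA d y := by
  by_cases hy : y = 0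
  · subst hy; simp [cA]
  · have hpos : 0 < y := Nat.pos_of_ne_zero hy
    simp only [cA]
    rw [Nat.digits_def' (by norm_num : (1:Nat) < 10) hpos, List.countP_cons]
    by_cases h : ((y % 10 : Nat) : Int) = d
    · rw [if_pos ⟨hpos, h⟩, decide_eq_true h]
      simp only [if_true]; push_cast; ring
    · rw [if_neg (fun hc => h hc.2), decide_eq_false h]
      simp only [Bool.false_eq_true, if_false]; push_cast; ring

-- B's outer while-loop invariant: from position p on, it adds the count of d among
-- the digits of (k*k)/p of every square, provided all squares are ≤ nn
theorem pv_altLoop_eq (nn : Nat) (n : Int) (d : Int)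
    (hbound : ∀ k ∈ PySem.List.pyRange 1 (n + 1) 1, (k * k).toNat ≤ nn) :
    ∀ (m p : Nat) (hp : 0 < p) (r : Int), nn + 1 - p ≤ m →
    altLoop nn n d p hp r
      = r + ((PySem.List.pyRange 1 (n + 1) 1).map (fun k => cA d ((k * k).toNat / p))).sum := by
  intro m
  induction m with
  | zero =>
    intro p hp r hm
    rw [altLoop, dif_neg (by omega)]
    have : ((PySem.List.pyRange 1 (n + 1) 1).map (fun k => cA d ((k * k).toNat / p)))
        = ((PySem.List.pyRange 1 (n + 1) 1).map (fun _ => (0 : Int))) := by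
      apply List.map_congr_left
      intro k hk
      rw [Nat.div_eq_of_lt (by have := hbound k hk; omega)]
      simp [cA]
    rw [this]; simp
  | succ m ih =>
    intro p hp r hm
    by_cases h : p ≤ nn
    · rw [altLoop, dif_pos h, ih (p * 10) (by omega) _ (by omega),
        pv_inner_eq n d p hp r]
      have : ((PySem.List.pyRange 1 (n + 1) 1).map (fun k => cA d ((k * k).toNat / p)))
          = ((PySem.List.pyRange 1 (n + 1) 1).map (fun k =>
              (if 1 ≤ (k * k).toNat / p ∧ (((k * k).toNat / p % 10 : Nat) : Int) = d
               then (1 : Int) else 0) + cA d ((k * k).toNat / (p * 10)))) := by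
        apply List.map_congr_left
        intro k _
        rw [← Nat.div_div_eq_div_mul, pv_step_eq d ((k * k).toNat / p)]
      rw [this, PySem.List.sum_map_add_int]
      ring
    · rw [altLoop, dif_neg h]
      have : ((PySem.List.pyRange 1 (n + 1) 1).map (fun k => cA d ((k * k).toNat / p)))
          = ((PySem.List.pyRange 1 (n + 1) 1).map (fun _ => (0 : Int))) := by
        apply List.map_congr_left
        intro k hk
        rw [Nat.div_eq_of_lt (by have := hbound k hk; omega)]
        simp [cA]
      rw [this]; simp

-- A as a sum over the squares
theorem pv_A_eq (n : Int) (d : Int) :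
    nb_dig n d = (if d = 0 then (1 : Int) else 0)
      + ((PySem.List.pyRange 1 (n + 1) 1).map (fun k => cA d ((k * k).toNat))).sum := by
  unfold nb_dig
  rw [show (fun (result : Int) (k : Int) => nbDigWhile (k * k).toNat d result)
        = fun r k => r + cA d ((k * k).toNat) from
      funext fun r => funext fun k => pv_while_eq (k * k).toNat d r,
    PySem.List.foldl_add]

-- ===== VERDICT (by name: the statement is the Claim_ definition above) =====
theorem nb_dig_spec : Claim_equal_nb_dig := by
  intro n d _
  unfold Spec_nb_dig nb_dig_alt
  by_cases hn : 1 ≤ n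
  · simp only [if_pos hn]
    have hbound : ∀ k ∈ PySem.List.pyRange 1 (n + 1) 1, (k * k).toNat ≤ (n * n).toNat := by
      intro k hk
      have h := PySem.List.mem_pyRange_one.mp hk
      have hkk : k * k ≤ n * n := by nlinarith [h.1, h.2]
      exact Int.toNat_le_toNat hkk
    rw [pv_altLoop_eq (n * n).toNat n d hbound ((n * n).toNat + 1) 1 (by norm_num) _ (by omega),
      pv_A_eq]
    simp [Nat.div_one]
  · simp only [if_neg hn]
    have hlen : (PySem.List.pyRange 1 (n + 1) 1).length = 0 := by
      rw [PySem.List.length_pyRange_one]; omega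
    rw [pv_A_eq, List.eq_nil_of_length_eq_zero hlen]
    simp
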